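-- pv_equiv track=rewrite | github.com/hrithik20007/Leetcode_Submissions | Medium/superPow.py | superPow
-- ===== SOURCE A (Python) =====
-- from typing import List
--
-- def superPow(a: int, b: List[int]) -> int:
--     if a==1 or a==0:
--         return a
--
--     d=0
--     for i in b:
--         d=d*10+i;
--
--     d=d%1140;
--     return pow(a,d,1337)
-- ===== SOURCE B (Python) =====
-- from typing import List
--
-- def superPow(a: int, b: List[int]) -> int:
--     if a == 0 or a == 1:
--         return a
--
--     # scan the digits back-to-front, keeping the exponent reduced mod 1140
--     # and a running modular weight 10^k mod 1140 -- never builds the big integer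
--     e, p = 0, 1
--     for digit in reversed(b):
--         e = (e + digit * p) % 1140
--         p = p * 10 % 1140
--     return pow(a, e, 1337)
-- ===== Notes on version B (the rewrite author's own statement) =====
-- stated objective: faster
-- what changed: Instead of concatenating all digits into one big integer (quadratic bigint arithmetic) and reducing it once, B scans the digit list back-to-front keeping the exponent reduced mod 1140 with a running modular weight 10^k mod 1140, so all intermediates stay bounded.
import Mathlib
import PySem

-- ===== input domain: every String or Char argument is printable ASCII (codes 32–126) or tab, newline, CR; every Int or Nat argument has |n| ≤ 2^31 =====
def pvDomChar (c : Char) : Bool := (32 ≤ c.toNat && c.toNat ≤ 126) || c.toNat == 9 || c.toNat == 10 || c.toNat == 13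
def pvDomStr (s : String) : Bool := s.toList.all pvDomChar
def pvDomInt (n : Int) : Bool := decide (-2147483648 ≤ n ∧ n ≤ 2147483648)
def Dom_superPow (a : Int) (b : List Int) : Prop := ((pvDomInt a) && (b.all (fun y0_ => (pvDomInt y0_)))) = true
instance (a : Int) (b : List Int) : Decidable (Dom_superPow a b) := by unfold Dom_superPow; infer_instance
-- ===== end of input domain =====

-- B replaces A's quadratic big-integer digit concatenation by a linear back-to-front
-- scan that keeps the exponent reduced mod 1140 (objective: faster).

-- ===== PORT A =====
-- pow(a, d, 1337) with d = PySem.Int.mod _ 1140 ≥ 0, so the Nat exponent d.toNat is exact.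
def superPow (a : Int) (b : List Int) : Int :=
  if a == 1 || a == 0 then a
  else
    let d : Int := b.foldl (fun d i => d * 10 + i) 0
    let d : Int := PySem.Int.mod d 1140
    PySem.Int.powMod a d.toNat 1337

-- ===== PORT B =====
-- e is kept in [0, 1140) by PySem.Int.mod, so e.toNat is exact for pow(a, e, 1337).
def superPow_alt (a : Int) (b : List Int) : Int :=
  if a == 0 || a == 1 then a
  else
    let ep : Int × Int :=
      b.reverse.foldl
        (fun s digit =>
          (PySem.Int.mod (s.1 + digit * s.2) 1140, PySem.Int.mod (s.2 * 10) 1140))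
        (0, 1)
    PySem.Int.powMod a ep.1.toNat 1337

-- ===== PRECONDITION & SPEC =====
def Spec_superPow (a : Int) (b : List Int) (out : Int) : Prop := out = superPow_alt a b
instance (a : Int) (b : List Int) (out : Int) : Decidable (Spec_superPow a b out) := by unfold Spec_superPow; infer_instance

-- ===== CLAIM (what is proved, stated in full; the proofs are below) =====
def Claim_equal_superPow : Prop := ∀ (a : Int) (b : List Int), Dom_superPow a b → Spec_superPow a b (superPow a b)

-- ===== LEMMAS AND PROOFS =====

theorem mod1140 (a : Int) : PySem.Int.mod a 1140 = a % 1140 :=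
  PySem.Int.mod_eq_emod_of_pos (by norm_num)

-- A's accumulator: folding from an arbitrary seed shifts the seed by 10^length.
theorem foldA_seed (b : List Int) : ∀ (d0 : Int),
    b.foldl (fun d i => d * 10 + i) d0
      = d0 * 10 ^ b.length + b.foldl (fun d i => d * 10 + i) 0 := by
  induction b with
  | nil => intro d0; simp
  | cons x xs ih =>
      intro d0
      simp only [List.foldl_cons, List.length_cons]
      rw [ih (d0 * 10 + x), ih (0 * 10 + x)]
      ring

-- B's loop invariant: after scanning the reversed list, the pair is
-- (value of the digits mod 1140, 10^length mod 1140).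
theorem foldB_char (b : List Int) :
    b.reverse.foldl
        (fun (s : Int × Int) digit =>
          (PySem.Int.mod (s.1 + digit * s.2) 1140, PySem.Int.mod (s.2 * 10) 1140))
        (0, 1)
      = (PySem.Int.mod (b.foldl (fun d i => d * 10 + i) 0) 1140,
         PySem.Int.mod ((10 : Int) ^ b.length) 1140) := by
  induction b with
  | nil => decide
  | cons x xs ih =>
      rw [List.reverse_cons, List.foldl_append, ih]
      simp only [List.foldl_cons, List.foldl_nil, List.length_cons, mod1140, Prod.mk.injEq]
      constructor
      · rw [foldA_seed xs (0 * 10 + x)]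
        conv_rhs => rw [Int.add_emod, Int.mul_emod]
        rw [Int.add_emod, Int.mul_emod, Int.emod_emod_of_dvd _ dvd_rfl,
          Int.emod_emod_of_dvd _ dvd_rfl]
        ring_nf
      · rw [Int.mul_emod, Int.emod_emod_of_dvd _ dvd_rfl, ← Int.mul_emod, pow_succ]

-- ===== VERDICT (by name: the statement is the Claim_ definition above) =====
theorem superPow_spec : Claim_equal_superPow := by
  intro a b _
  unfold Spec_superPow superPow superPow_alt
  by_cases h1 : a = 1
  · simp [h1]
  · by_cases h0 : a = 0
    · simp [h0]
    · rw [if_neg (by simp [h1, h0]), if_neg (by simp [h1, h0]), foldB_char b]
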